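-- pv_equiv track=rewrite | github.com/FranciscoMassano/ISEL-MDP-2048 | j2048_motor_40708.py | somar_esquerda
-- ===== SOURCE A (Python) =====
-- def somar_esquerda(uma_lista):
--
--     resultado = []
--     lenlista  = len(uma_lista)
--     pontos    = 0
--     indice    = 0
--
--     while indice < lenlista - 1:
--         valor = uma_lista[indice]
--         if uma_lista[indice + 1] == valor:
--             soma = valor + valor
--             resultado.append(soma)
--             pontos = pontos + soma
--             indice = indice + 2
--         else:
--             resultado.append(valor)
--             indice = indice + 1
--
--     #tratar ultima posição
--     if indice == lenlista - 1:
--         resultado.append(uma_lista[indice])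
--
--     while len(resultado) < lenlista:
--          resultado.append(0)
--
--     return (resultado, pontos)
-- ===== SOURCE B (Python) =====
-- def somar_esquerda(uma_lista):
--     # group-first decomposition: cut the list into maximal runs of equal
--     # values, emit c//2 merged tiles then the odd leftover per run, pad with 0
--     resultado = []
--     pontos = 0
--     rest = uma_lista
--     while rest:
--         v = rest[0]
--         c = 1
--         while c < len(rest) and rest[c] == v:
--             c += 1
--         s = v + v
--         resultado += [s] * (c // 2) + [v] * (c % 2)
--         pontos += s * (c // 2)
--         rest = rest[c:]
--     resultado += [0] * (len(uma_lista) - len(resultado))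
--     return (resultado, pontos)
-- ===== Notes on version B (the rewrite author's own statement) =====
-- stated objective: alternative
-- what changed: Replaces A's index-jumping pairwise scan with a group-first pass: cut the row into maximal runs of equal values, emit c//2 merged tiles and the odd leftover per run, then pad with zeros.
import Mathlib
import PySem

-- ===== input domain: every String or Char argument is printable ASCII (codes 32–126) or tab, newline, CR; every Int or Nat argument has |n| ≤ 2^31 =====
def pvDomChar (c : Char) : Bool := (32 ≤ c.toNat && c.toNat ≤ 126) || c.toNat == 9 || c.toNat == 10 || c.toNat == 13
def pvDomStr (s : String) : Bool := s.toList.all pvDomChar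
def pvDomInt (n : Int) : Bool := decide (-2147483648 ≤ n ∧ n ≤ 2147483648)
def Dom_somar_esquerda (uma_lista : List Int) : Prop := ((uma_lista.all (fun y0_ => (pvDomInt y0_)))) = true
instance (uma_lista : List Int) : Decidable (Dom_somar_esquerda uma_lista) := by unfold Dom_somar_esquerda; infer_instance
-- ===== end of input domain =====

-- B replaces A's index-jumping pairwise scan with a group-first pass over maximal runs
-- of equal values (alternative decomposition, same linear cost); return values proved equal.

-- ===== PORT A =====

-- while len(resultado) < lenlista: resultado.append(0)
def pvPadA (res : List Int) (lenl : Int) : List Int :=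
  if (res.length : Int) < lenl then pvPadA (res ++ [0]) lenl else res
termination_by (lenl - res.length).toNat
decreasing_by simp; omega

-- the main 'while indice < lenlista - 1' loop, then the last-position fix-up and padding
def pvALoop (l : List Int) (lenl : Int) (idx : Int) (res : List Int) (pts : Int) : List Int × Int :=
  if idx < lenl - 1 then
    let valor := (PySem.List.pyGet? l idx).getD 0
    if (PySem.List.pyGet? l (idx + 1)).getD 0 = valor then
      pvALoop l lenl (idx + 2) (res ++ [valor + valor]) (pts + (valor + valor))
    else
      pvALoop l lenl (idx + 1) (res ++ [valor]) pts
  else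
    let res2 := if idx = lenl - 1 then res ++ [(PySem.List.pyGet? l idx).getD 0] else res
    (pvPadA res2 lenl, pts)
termination_by (lenl - idx).toNat
decreasing_by all_goals omega

def somar_esquerda (uma_lista : List Int) : List Int × Int :=
  pvALoop uma_lista (uma_lista.length : Int) 0 [] 0

-- ===== PORT B =====

-- inner 'while c < len(rest) and rest[c] == v': run length of v in the tail
def pvRunLen (v : Int) : List Int → Nat
  | [] => 0
  | x :: r => if x = v then 1 + pvRunLen v r else 0

-- outer 'while rest:' loop, accumulating resultado and pontos
def pvBLoop (rest : List Int) (res : List Int) (pts : Int) : List Int × Int :=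
  match rest with
  | [] => (res, pts)
  | v :: t =>
      let c := 1 + pvRunLen v t
      let s := v + v
      pvBLoop ((v :: t).drop c)
        (res ++ (List.replicate (c / 2) s ++ List.replicate (c % 2) v))
        (pts + s * ((c / 2 : Nat) : Int))
termination_by rest.length
decreasing_by simp

def somar_esquerda_alt (uma_lista : List Int) : List Int × Int :=
  let rp := pvBLoop uma_lista [] 0
  (rp.1 ++ List.replicate (uma_lista.length - rp.1.length) 0, rp.2)

-- ===== PRECONDITION & SPEC =====
def Spec_somar_esquerda (uma_lista : List Int) (out : List Int × Int) : Prop := out = somar_esquerda_alt uma_lista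
instance (uma_lista : List Int) (out : List Int × Int) : Decidable (Spec_somar_esquerda uma_lista out) := by unfold Spec_somar_esquerda; infer_instance

-- ===== CLAIM (what is proved, stated in full; the proofs are below) =====
def Claim_equal_somar_esquerda : Prop := ∀ (uma_lista : List Int), Dom_somar_esquerda uma_lista → Spec_somar_esquerda uma_lista (somar_esquerda uma_lista)

-- ===== LEMMAS AND PROOFS =====

-- reference merge: pairwise scan as a structural recursion
def pvMrg : List Int → List Int × Int
  | [] => ([], 0)
  | [v] => ([v], 0)
  | a :: b :: rest =>
      if a = b then
        let r := pvMrg rest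
        ((a + a) :: r.1, r.2 + (a + a))
      else
        let r := pvMrg (b :: rest)
        (a :: r.1, r.2)

theorem pvPadA_eq (res : List Int) (lenl : Int) :
    pvPadA res lenl = res ++ List.replicate (lenl.toNat - res.length) 0 := by
  rw [pvPadA]
  split
  · rename_i h
    rw [pvPadA_eq (res ++ [0]) lenl]
    have he : lenl.toNat - res.length = (lenl.toNat - (res ++ [0]).length) + 1 := by
      simp; omega
    rw [he, List.replicate_succ, List.append_assoc]
    simp
  · rename_i h
    have he : lenl.toNat - res.length = 0 := by simp at h; omega
    simp [he]
termination_by (lenl - res.length).toNat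
decreasing_by simp; omega

theorem pvRunLen_take (v : Int) (t : List Int) :
    t.take (pvRunLen v t) = List.replicate (pvRunLen v t) v := by
  induction t with
  | nil => simp [pvRunLen]
  | cons x r ih =>
    by_cases h : x = v
    · simp [pvRunLen, h, Nat.add_comm 1, List.replicate_succ, ih]
    · simp [pvRunLen, h]

theorem pvRunLen_drop_head (v : Int) (t : List Int) :
    (t.drop (pvRunLen v t)).head? ≠ some v := by
  induction t with
  | nil => simp [pvRunLen]
  | cons x r ih =>
    by_cases h : x = v
    · simpa [pvRunLen, h, Nat.add_comm 1] using ih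
    · simp [pvRunLen, h]

theorem pvMrg_replicate (c : Nat) (v : Int) (rest : List Int)
    (h : rest.head? ≠ some v) :
    pvMrg (List.replicate c v ++ rest)
      = (List.replicate (c / 2) (v + v) ++ List.replicate (c % 2) v ++ (pvMrg rest).1,
         (v + v) * ((c / 2 : Nat) : Int) + (pvMrg rest).2) := by
  match c with
  | 0 => simp
  | 1 =>
    cases rest with
    | nil => simp [pvMrg]
    | cons b r =>
      have hb : ¬ (v = b) := fun e => h (by simp [e])
      simp [pvMrg, hb]
  | (c + 2) =>
    have ih := pvMrg_replicate c v rest h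
    have hrep : List.replicate (c + 2) v ++ rest
        = v :: v :: (List.replicate c v ++ rest) := by
      simp [List.replicate_succ]
    rw [hrep]
    show (if v = v then _ else _) = _
    rw [if_pos rfl, ih]
    have h2 : (c + 2) / 2 = c / 2 + 1 := by omega
    have h3 : (c + 2) % 2 = c % 2 := by omega
    refine Prod.ext ?_ ?_
    · simp [h2, h3, List.replicate_succ]
    · simp only [h2]
      push_cast
      ring

theorem pvBLoop_eq (rest : List Int) (res : List Int) (pts : Int) :
    pvBLoop rest res pts = (res ++ (pvMrg rest).1, pts + (pvMrg rest).2) := by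
  match rest with
  | [] => simp [pvBLoop, pvMrg]
  | v :: t =>
    rw [pvBLoop]
    have hdrop : (v :: t).drop (1 + pvRunLen v t) = t.drop (pvRunLen v t) := by
      simp [Nat.add_comm 1]
    have hsplit : v :: t
        = List.replicate (1 + pvRunLen v t) v ++ t.drop (pvRunLen v t) := by
      conv_lhs => rw [← List.take_append_drop (pvRunLen v t) t]
      simp [Nat.add_comm 1, List.replicate_succ, pvRunLen_take]
    have ih := pvBLoop_eq ((v :: t).drop (1 + pvRunLen v t))
        (res ++ (List.replicate ((1 + pvRunLen v t) / 2) (v + v)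
          ++ List.replicate ((1 + pvRunLen v t) % 2) v))
        (pts + (v + v) * (((1 + pvRunLen v t) / 2 : Nat) : Int))
    rw [ih, hdrop]
    conv_rhs => rw [hsplit]
    rw [pvMrg_replicate (1 + pvRunLen v t) v _ (pvRunLen_drop_head v t)]
    refine Prod.ext ?_ ?_
    · simp [List.append_assoc]
    · simp [add_assoc]
termination_by rest.length
decreasing_by simp

theorem pvALoop_eq (l : List Int) (idx : Nat) (res : List Int) (pts : Int)
    (h : idx ≤ l.length) :
    pvALoop l (l.length : Int) (idx : Int) res pts
      = (pvPadA (res ++ (pvMrg (l.drop idx)).1) (l.length : Int),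
         pts + (pvMrg (l.drop idx)).2) := by
  rw [pvALoop]
  by_cases hlt : (idx : Int) < (l.length : Int) - 1
  · rw [if_pos hlt]
    have h2 : idx + 1 < l.length := by omega
    have h1 : idx < l.length := by omega
    have hg1 : (PySem.List.pyGet? l (idx : Int)).getD 0 = l[idx] := by
      rw [PySem.List.pyGet?_natCast]
      simp [List.getElem?_eq_getElem h1]
    have hg2 : (PySem.List.pyGet? l ((idx : Int) + 1)).getD 0 = l[idx + 1] := by
      have : ((idx : Int) + 1) = ((idx + 1 : Nat) : Int) := by push_cast; ring
      rw [this, PySem.List.pyGet?_natCast]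
      simp [List.getElem?_eq_getElem h2]
    rw [hg1, hg2]
    have hd1 : l.drop idx = l[idx] :: l.drop (idx + 1) := List.drop_eq_getElem_cons h1
    have hd2 : l.drop (idx + 1) = l[idx + 1] :: l.drop (idx + 2) :=
      List.drop_eq_getElem_cons h2
    by_cases heq : l[idx + 1] = l[idx]
    · rw [if_pos heq]
      have hc1 : ((idx : Int) + 2) = ((idx + 2 : Nat) : Int) := by push_cast; ring
      rw [hc1, pvALoop_eq l (idx + 2) _ _ (by omega)]
      have hm : pvMrg (l.drop idx)
          = ((l[idx] + l[idx]) :: (pvMrg (l.drop (idx + 2))).1,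
             (pvMrg (l.drop (idx + 2))).2 + (l[idx] + l[idx])) := by
        rw [hd1, hd2, pvMrg, if_pos heq.symm]
      rw [hm]
      refine Prod.ext ?_ ?_
      · simp [List.append_assoc]
      · simp; ring
    · rw [if_neg heq]
      have hc1 : ((idx : Int) + 1) = ((idx + 1 : Nat) : Int) := by push_cast; ring
      rw [hc1, pvALoop_eq l (idx + 1) _ _ (by omega)]
      have hm : pvMrg (l.drop idx)
          = (l[idx] :: (pvMrg (l.drop (idx + 1))).1, (pvMrg (l.drop (idx + 1))).2) := by
        rw [hd1, hd2, pvMrg, if_neg (fun e => heq e.symm), ← hd2]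
      rw [hm]
      refine Prod.ext ?_ ?_
      · simp [List.append_assoc]
      · simp
  · rw [if_neg hlt]
    by_cases heq : (idx : Int) = (l.length : Int) - 1
    · rw [if_pos heq]
      have h1 : idx < l.length := by omega
      have hg1 : (PySem.List.pyGet? l (idx : Int)).getD 0 = l[idx] := by
        rw [PySem.List.pyGet?_natCast]
        simp [List.getElem?_eq_getElem h1]
      have hidx : idx = l.length - 1 := by omega
      have hd : l.drop idx = [l[idx]] := by
        rw [List.drop_eq_getElem_cons h1]
        have : l.drop (idx + 1) = [] := by
          apply List.drop_eq_nil_of_le; omega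
        rw [this]
      rw [hg1, hd]
      simp [pvMrg]
    · rw [if_neg heq]
      have hidx : idx = l.length := by omega
      have hd : l.drop idx = [] := List.drop_eq_nil_of_le (by omega)
      rw [hd]
      simp [pvMrg]
termination_by l.length - idx
decreasing_by all_goals omega

-- ===== VERDICT (by name: the statement is the Claim_ definition above) =====
theorem somar_esquerda_spec : Claim_equal_somar_esquerda := by
  intro l _
  unfold Spec_somar_esquerda somar_esquerda somar_esquerda_alt
  rw [pvBLoop_eq]
  have h0 := pvALoop_eq l 0 [] 0 (Nat.zero_le _)
  simp only [Nat.cast_zero, List.drop_zero, List.nil_append, Int.zero_add] at h0 ⊢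
  rw [h0]
  simp [pvPadA_eq]
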